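-- pv_equiv track=rewrite | github.com/HovhannesMkrtchyan2004/Python_Homewhork | Lesson 39.py | financialCrisis
-- ===== SOURCE A (Python) =====
-- def financialCrisis(roadRegister):
--     ret_val = []
--     for i in range(len(roadRegister)):
--         pop_list = roadRegister.pop(i)
--         append_list = []
--         for j in range(len(roadRegister)):
--             val = roadRegister[j].pop(i)
--             append_list.append(roadRegister[j].copy())
--             roadRegister[j].insert(i, val)
--         ret_val.append(append_list)
--         roadRegister.insert(i, pop_list)
--
--     return ret_val
-- ===== SOURCE B (Python) =====
-- def financialCrisis(roadRegister):
--     n = len(roadRegister)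
--     return [[row[:i] + row[i + 1:] for row in roadRegister[:i] + roadRegister[i + 1:]]
--             for i in range(n)]
-- ===== Notes on version B (the rewrite author's own statement) =====
-- stated objective: simpler
-- what changed: A mutates the matrix with pop/copy/insert to cut row i and column i and then repairs it; B is a single pure slicing comprehension that builds each minor from row/column slices without touching the input.
import Mathlib
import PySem

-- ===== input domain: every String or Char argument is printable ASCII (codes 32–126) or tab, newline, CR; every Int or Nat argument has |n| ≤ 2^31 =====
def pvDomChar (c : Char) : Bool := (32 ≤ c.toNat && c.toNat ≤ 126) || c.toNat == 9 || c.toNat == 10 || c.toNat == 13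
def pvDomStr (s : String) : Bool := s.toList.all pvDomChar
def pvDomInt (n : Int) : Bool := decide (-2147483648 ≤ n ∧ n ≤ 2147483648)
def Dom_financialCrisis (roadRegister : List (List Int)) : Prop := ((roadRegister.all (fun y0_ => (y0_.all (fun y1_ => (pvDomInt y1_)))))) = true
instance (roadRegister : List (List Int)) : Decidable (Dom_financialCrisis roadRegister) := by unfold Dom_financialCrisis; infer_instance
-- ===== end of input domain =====

-- B builds each minor with pure slicing comprehensions instead of A's pop/copy/insert mutation
-- dance (objective: simpler).  Side effects: A mutates roadRegister in place but restores it
-- before returning; B never mutates; the equivalence proved here is about the return value.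

-- ===== PORT A =====
-- Literal transliteration of A: the two Python `for` loops over `range(len(...))` become
-- foldls over `List.range`, the mutable list becomes the first state component.
-- Where Python raises IndexError (pop? / index out of range) the port keeps the state
-- unchanged; those inputs are excluded by Pre_financialCrisis.
def financialCrisis (roadRegister : List (List Int)) : List (List (List Int)) :=
  ((List.range roadRegister.length).foldl
    (fun st (i : Nat) =>
      match PySem.List.pop? st.1 (i : Int) with
      | none => st
      | some (popList, M') =>
        let inner := (List.range M'.length).foldl
          (fun st2 j =>
            match st2.1[j]? with
            | none => st2
            | some row =>
              match PySem.List.pop? row (i : Int) with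
              | none => st2
              | some (val, rowRest) =>
                (st2.1.set j (PySem.List.insert rowRest (i : Int) val),
                 st2.2 ++ [rowRest]))
          (M', ([] : List (List Int)))
        (PySem.List.insert inner.1 (i : Int) popList, st.2 ++ [inner.2]))
    (roadRegister, ([] : List (List (List Int))))).2

-- ===== PORT B =====
-- Transliteration of Source B; the Python slices row[:i], row[i+1:] with the nonnegative
-- loop index i are exactly List.take i / List.drop (i+1) (PySem.List.slice_to_natCast /
-- slice_from_natCast).
def financialCrisis_alt (roadRegister : List (List Int)) : List (List (List Int)) :=
  (List.range roadRegister.length).map (fun i =>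
    (roadRegister.take i ++ roadRegister.drop (i + 1)).map
      (fun row => row.take i ++ row.drop (i + 1)))

-- ===== PRECONDITION & SPEC =====
-- A raises IndexError (row.pop(i)) exactly when, for some outer index i, some row r ≠ i is
-- shorter than i+1; Pre_ excludes exactly those inputs (A returns normally on all others).
def Pre_financialCrisis (roadRegister : List (List Int)) : Prop :=
  ∀ i < roadRegister.length, ∀ r < roadRegister.length,
    r ≠ i → i < (roadRegister.getD r []).length
instance (roadRegister : List (List Int)) : Decidable (Pre_financialCrisis roadRegister) := by unfold Pre_financialCrisis; infer_instance
def pvWitness_financialCrisis : List (List Int) := [[1, 2], [3, 4]]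

def Spec_financialCrisis (roadRegister : List (List Int)) (out : List (List (List Int))) : Prop := out = financialCrisis_alt roadRegister
instance (roadRegister : List (List Int)) (out : List (List (List Int))) : Decidable (Spec_financialCrisis roadRegister out) := by unfold Spec_financialCrisis; infer_instance

-- ===== CLAIM (what is proved, stated in full; the proofs are below) =====
def Claim_equal_financialCrisis : Prop := ∀ (roadRegister : List (List Int)), Dom_financialCrisis roadRegister → Pre_financialCrisis roadRegister → Spec_financialCrisis roadRegister (financialCrisis roadRegister)

-- ===== LEMMAS AND PROOFS =====

-- Popping index i of a sufficiently long list yields the element and the two slices.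
theorem pv_pop_row {α : Type} {row : List α} {i : Nat} (h : i < row.length) :
    PySem.List.pop? row (i : Int) = some (row[i], row.take i ++ row.drop (i + 1)) := by
  rw [PySem.List.pop?_natCast row i h, List.eraseIdx_eq_take_drop_succ]

-- Re-inserting the popped element at index i restores the original list.
theorem pv_insert_back {α : Type} {row : List α} {i : Nat} (h : i < row.length) :
    PySem.List.insert (row.take i ++ row.drop (i + 1)) (i : Int) row[i] = row := by
  have hlen : i ≤ (row.take i ++ row.drop (i + 1)).length := by
    simp [List.length_take, List.length_drop]; omega
  rw [PySem.List.insert_natCast _ _ _ hlen]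
  have htake : (row.take i ++ row.drop (i + 1)).take i = row.take i := by
    rw [List.take_append_of_le_length (by simp; omega)]
    simp
  have hdrop : (row.take i ++ row.drop (i + 1)).drop i = row.drop (i + 1) := by
    rw [List.drop_append_of_le_length (by simp; omega)]
    simp
  rw [htake, hdrop, List.getElem_cons_drop, List.take_append_drop]

-- Inner loop invariant: each step restores row j, so the matrix component stays unchanged
-- while the accumulator collects the minor of each row in order.
theorem pv_inner_loop (i : Nat) (M : List (List Int)) (h : ∀ row ∈ M, i < row.length) :
    ∀ (k j : Nat), j + k = M.length → ∀ (acc : List (List Int)),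
    (List.range' j k).foldl
      (fun st2 j =>
        match st2.1[j]? with
        | none => st2
        | some row =>
          match PySem.List.pop? row (i : Int) with
          | none => st2
          | some (val, rowRest) =>
            (st2.1.set j (PySem.List.insert rowRest (i : Int) val),
             st2.2 ++ [rowRest]))
      (M, acc)
    = (M, acc ++ (M.drop j).map (fun row => row.take i ++ row.drop (i + 1))) := by
  intro k
  induction k with
  | zero => intro j hj acc; simp; omega
  | succ k ih =>
    intro j hj acc
    have hjlt : j < M.length := by omega
    have hrow : i < M[j].length := h M[j] (List.mem_iff_getElem.mpr ⟨j, hjlt, rfl⟩)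
    rw [List.range'_succ, List.foldl_cons]
    have hstep :
        (match M[j]? with
         | none => ((M, acc) : List (List Int) × List (List Int))
         | some row =>
           match PySem.List.pop? row (i : Int) with
           | none => (M, acc)
           | some (val, rowRest) =>
             (M.set j (PySem.List.insert rowRest (i : Int) val), acc ++ [rowRest]))
        = (M, acc ++ [M[j].take i ++ M[j].drop (i + 1)]) := by
      rw [List.getElem?_eq_getElem hjlt]
      simp only [pv_pop_row hrow, pv_insert_back hrow, List.set_getElem_self]
    simp only [hstep]
    rw [ih (j + 1) (by omega)]
    have hdj : M.drop j = M[j] :: M.drop (j + 1) := List.drop_eq_getElem_cons hjlt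
    rw [hdj, List.map_cons]
    simp

-- Under Pre_, every row of the matrix with row i removed is longer than i.
theorem pv_rows_long (M : List (List Int)) (hPre : Pre_financialCrisis M)
    {i : Nat} (hi : i < M.length) :
    ∀ row ∈ M.take i ++ M.drop (i + 1), i < row.length := by
  intro row hrow
  rcases List.mem_append.mp hrow with hmem | hmem
  · obtain ⟨r, hr, hEq⟩ := List.mem_iff_getElem.mp hmem
    have hri : r < i := lt_of_lt_of_le hr (List.length_take_le i M)
    have hrM : r < M.length := by rw [List.length_take] at hr; omega
    have hlong := hPre i hi r hrM (by omega)
    rw [List.getD_eq_getElem M [] hrM] at hlong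
    rw [List.getElem_take] at hEq
    rw [← hEq]; exact hlong
  · obtain ⟨r, hr, hEq⟩ := List.mem_iff_getElem.mp hmem
    have hrM : i + 1 + r < M.length := by rw [List.length_drop] at hr; omega
    have hlong := hPre i hi (i + 1 + r) hrM (by omega)
    rw [List.getD_eq_getElem M [] hrM] at hlong
    rw [List.getElem_drop] at hEq
    rw [← hEq]; exact hlong

-- Outer loop invariant: each iteration restores the matrix and appends the minor list for
-- its index.
theorem pv_outer_loop (M : List (List Int)) (hPre : Pre_financialCrisis M) :
    ∀ (k j : Nat), j + k = M.length → ∀ (acc : List (List (List Int))),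
    (List.range' j k).foldl
      (fun st (i : Nat) =>
        match PySem.List.pop? st.1 (i : Int) with
        | none => st
        | some (popList, M') =>
          let inner := (List.range M'.length).foldl
            (fun st2 j =>
              match st2.1[j]? with
              | none => st2
              | some row =>
                match PySem.List.pop? row (i : Int) with
                | none => st2
                | some (val, rowRest) =>
                  (st2.1.set j (PySem.List.insert rowRest (i : Int) val),
                   st2.2 ++ [rowRest]))
            (M', ([] : List (List Int)))
          (PySem.List.insert inner.1 (i : Int) popList, st.2 ++ [inner.2]))
      (M, acc)
    = (M, acc ++ (List.range' j k).map (fun i =>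
        (M.take i ++ M.drop (i + 1)).map (fun row => row.take i ++ row.drop (i + 1)))) := by
  intro k
  induction k with
  | zero => intro j hj acc; simp
  | succ k ih =>
    intro j hj acc
    have hjlt : j < M.length := by omega
    have hinner := pv_inner_loop j (M.take j ++ M.drop (j + 1)) (pv_rows_long M hPre hjlt)
      (M.take j ++ M.drop (j + 1)).length 0 (by omega) []
    rw [List.range'_succ, List.foldl_cons]
    have hstep :
        (match PySem.List.pop? M (j : Int) with
         | none => ((M, acc) : List (List Int) × List (List (List Int)))
         | some (popList, M') =>
           let inner := (List.range M'.length).foldl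
             (fun st2 j2 =>
               match st2.1[j2]? with
               | none => st2
               | some row =>
                 match PySem.List.pop? row (j : Int) with
                 | none => st2
                 | some (val, rowRest) =>
                   (st2.1.set j2 (PySem.List.insert rowRest (j : Int) val),
                    st2.2 ++ [rowRest]))
             (M', ([] : List (List Int)))
           (PySem.List.insert inner.1 (j : Int) popList, acc ++ [inner.2]))
        = (M, acc ++ [(M.take j ++ M.drop (j + 1)).map
            (fun row => row.take j ++ row.drop (j + 1))]) := by
      rw [pv_pop_row hjlt]
      simp only [List.range_eq_range', List.length_append, List.length_take,
        List.length_drop, List.drop_zero, List.nil_append] at hinner ⊢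
      simp only [hinner, pv_insert_back hjlt]
    simp only [hstep]
    rw [ih (j + 1) (by omega), List.map_cons]
    simp

-- ===== VERDICT (by name: the statement is the Claim_ definition above) =====
theorem financialCrisis_spec : Claim_equal_financialCrisis := by
  intro M _ hPre
  unfold Spec_financialCrisis financialCrisis financialCrisis_alt
  rw [List.range_eq_range']
  rw [pv_outer_loop M hPre M.length 0 (by omega) []]
  simp
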